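-- pv_equiv track=rewrite | github.com/PucekPLZ/University-of-Wroclaw-Computer-Science | Materials/Introduction to Programming in Python/lista 11/zadanie2.py | liczby
-- ===== SOURCE A (Python) =====
-- def liczby(napis):
--     dd = {}
--
--     po = ""
--     l = 1
--     for i in range(len(napis)):
--         if napis[i] in dd.keys():
--             po += dd[napis[i]]
--             if i != len(napis)-1:
--                 po += "-"
--         else:
--             dd[napis[i]] = str(l)
--             l += 1
--             po += dd[napis[i]]
--             if i != len(napis)-1:
--                 po += "-"
--
--     return po
-- ===== SOURCE B (Python) =====
-- def liczby(napis):
--     num = {c: str(len(set(napis[:napis.index(c)])) + 1) for c in set(napis)}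
--     return "-".join(num[c] for c in napis)
-- ===== Notes on version B (the rewrite author's own statement) =====
-- stated objective: alternative
-- what changed: A runs one stateful index loop maintaining a growing dict, a running counter and manual last-index dash bookkeeping; B instead computes each character's number by a closed form -- one plus the count of distinct characters in the prefix before that character's first occurrence (set over a slice at str.index) -- evaluated once per distinct character in a comprehension, then dash-joins the tokens.
import Mathlib
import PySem

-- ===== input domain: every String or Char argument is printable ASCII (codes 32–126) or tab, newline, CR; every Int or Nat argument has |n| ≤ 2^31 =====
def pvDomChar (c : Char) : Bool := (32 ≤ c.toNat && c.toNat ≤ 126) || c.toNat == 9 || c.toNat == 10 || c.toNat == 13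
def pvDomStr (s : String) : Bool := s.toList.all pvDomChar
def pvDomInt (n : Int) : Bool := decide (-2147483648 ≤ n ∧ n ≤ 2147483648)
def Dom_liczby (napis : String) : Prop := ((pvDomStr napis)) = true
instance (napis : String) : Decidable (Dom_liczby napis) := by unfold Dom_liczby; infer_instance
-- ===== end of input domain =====

-- B replaces A's stateful dict+counter+dash-bookkeeping loop by a stateless per-character
-- closed form (1 + #distinct chars before the character's first occurrence), dash-joined
-- (objective: alternative; same observable behaviour).

-- ===== PORT A =====
-- loop body of A's `for i in range(len(napis))`; state = (dd, po, l)
def liczbyStep (cs : List Char) (n : Int)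
    (s : PySem.Dict Char (List Char) × List Char × Int) (i : Int) :
    PySem.Dict Char (List Char) × List Char × Int :=
  let c := PySem.List.pyGetD cs i ' '
  match s.1.get? c with
  | some v => (s.1, s.2.1 ++ v ++ (if i ≠ n - 1 then ['-'] else []), s.2.2)
  | none =>
      (s.1.insert c (PySem.Int.toChars s.2.2),
       s.2.1 ++ PySem.Int.toChars s.2.2 ++ (if i ≠ n - 1 then ['-'] else []),
       s.2.2 + 1)

def liczby (napis : String) : String :=
  let cs := napis.toList
  let n := PySem.List.len cs
  let st := (PySem.List.pyRange 0 n 1).foldl (liczbyStep cs n)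
      (PySem.Dict.empty, [], 1)
  String.ofList st.2.1

-- ===== PORT B =====
-- value expression of B's dict comprehension: `str(len(set(napis[:napis.index(c)])) + 1)`;
-- napis.index(c) is the first-occurrence index of the character c (c is drawn from napis,
-- so it is present), ported via PySem.List.index? on the code points — exact on every
-- admitted input.
def liczbyAltTok (cs : List Char) (c : Char) : List Char :=
  PySem.Int.toChars
    (((PySem.Set.ofList
        (PySem.List.slice cs none
          (some (((PySem.List.index? cs c).getD 0 : Nat) : Int)))).length : Int) + 1)

-- the dict comprehension iterates set(napis); its iteration order only determines the
-- insertion order of `num`, which is afterwards only looked up, so the result is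
-- order-independent (ported over PySem.Set.ofList).
def liczby_alt (napis : String) : String :=
  let cs := napis.toList
  let num := (PySem.Set.ofList cs).foldl
      (fun d c => d.insert c (liczbyAltTok cs c)) PySem.Dict.empty
  String.ofList (PySem.Chars.join ['-'] (cs.map (fun c => num.getD c [])))

-- ===== PRECONDITION & SPEC =====
def Spec_liczby (napis : String) (out : String) : Prop := out = liczby_alt napis
instance (napis : String) (out : String) : Decidable (Spec_liczby napis out) := by unfold Spec_liczby; infer_instance

-- ===== CLAIM (what is proved, stated in full; the proofs are below) =====
def Claim_equal_liczby : Prop := ∀ (napis : String), Dom_liczby napis → Spec_liczby napis (liczby napis)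

-- ===== LEMMAS AND PROOFS =====

-- proof-side helper: the dict A's loop builds, as a fold over the characters
-- (value of a fresh key = str(size + 1); pvMinv below shows A's counter l is size + 1)
def pvBuild (dd : PySem.Dict Char (List Char)) (c : Char) :
    PySem.Dict Char (List Char) :=
  if dd.contains c then dd else dd.insert c (PySem.Int.toChars ((dd.size : Int) + 1))

-- A's loop body on a non-final index, written without the index (always appends '-')
def pvG (s : PySem.Dict Char (List Char) × List Char × Int) (c : Char) :
    PySem.Dict Char (List Char) × List Char × Int :=
  match s.1.get? c with
  | some v => (s.1, s.2.1 ++ v ++ ['-'], s.2.2)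
  | none =>
      (s.1.insert c (PySem.Int.toChars s.2.2),
       s.2.1 ++ PySem.Int.toChars s.2.2 ++ ['-'],
       s.2.2 + 1)

lemma liczbyStep_eq_pvG (cs : List Char) (n i : Int) (h : i ≠ n - 1)
    (s : PySem.Dict Char (List Char) × List Char × Int) :
    liczbyStep cs n s i = pvG s (PySem.List.pyGetD cs i ' ') := by
  cases h' : s.1.get? (PySem.List.pyGetD cs i ' ') <;>
    simp [liczbyStep, pvG, h', h]

-- the dict pass never changes an existing binding
lemma pvPreserve (t : List Char) (dd : PySem.Dict Char (List Char)) {c : Char}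
    {v : List Char} (h : dd.get? c = some v) :
    (t.foldl pvBuild dd).get? c = some v := by
  induction t generalizing dd with
  | nil => simpa using h
  | cons x t ih =>
      simp only [List.foldl_cons]
      by_cases hx : dd.contains x = true
      · simpa [pvBuild, hx] using ih dd h
      · simp only [pvBuild, hx]
        have hcx : c ≠ x := by
          intro rfl'
          subst rfl'
          simp [PySem.Dict.contains_eq_isSome_get?, h] at hx
        simp only [Bool.false_eq_true, if_false]
        exact ih _ (by rw [PySem.Dict.get?_insert_of_ne dd _ hcx]; exact h)

-- characters absent from the processed part stay unbound
lemma pvAbsent (t : List Char) (dd : PySem.Dict Char (List Char)) {c : Char}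
    (hc : c ∉ t) (h : dd.get? c = none) :
    (t.foldl pvBuild dd).get? c = none := by
  induction t generalizing dd with
  | nil => simpa using h
  | cons x t ih =>
      simp only [List.foldl_cons]
      have hcx : c ≠ x := fun h' => hc (h' ▸ List.mem_cons_self ..)
      by_cases hx : dd.contains x = true
      · simpa [pvBuild, hx] using ih _ (fun h' => hc (List.mem_cons_of_mem _ h')) h
      · simp only [pvBuild, hx, Bool.false_eq_true, if_false]
        exact ih _ (fun h' => hc (List.mem_cons_of_mem _ h'))
          (by rw [PySem.Dict.get?_insert_of_ne dd _ hcx]; exact h)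

-- the keys of the built dict are the distinct characters of the processed part, in order
lemma pvKeysBuild (t : List Char) (dd : PySem.Dict Char (List Char)) :
    (t.foldl pvBuild dd).keys = PySem.Set.update dd.keys t := by
  induction t generalizing dd with
  | nil => simp [PySem.Set.update]
  | cons x t ih =>
      simp only [List.foldl_cons, PySem.Set.update_cons]
      by_cases hx : dd.contains x = true
      · have hmem : x ∈ dd.keys := (PySem.Dict.contains_iff_mem_keys dd x).mp hx
        rw [show pvBuild dd x = dd by simp [pvBuild, hx],
            PySem.Set.add_of_mem hmem, ih]
      · have hmem : x ∉ dd.keys := fun h =>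
          (by simp [hx] : ¬ dd.contains x = true)
            ((PySem.Dict.contains_iff_mem_keys dd x).mpr h)
        rw [show pvBuild dd x = dd.insert x (PySem.Int.toChars ((dd.size : Int) + 1))
              by simp [pvBuild, hx],
            PySem.Set.add_of_not_mem hmem, ih,
            PySem.Dict.keys_insert_of_not_contains dd _ (by simpa using hx)]

-- main invariant: A's dash-always loop = the dict pass plus the joined-with-trailing-dash output
lemma pvMinv (t : List Char) (dd : PySem.Dict Char (List Char)) (po : List Char) :
    t.foldl pvG (dd, po, (dd.size : Int) + 1)
      = (t.foldl pvBuild dd,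
         po ++ (t.map (fun c => (t.foldl pvBuild dd).getD c [] ++ ['-'])).flatten,
         ((t.foldl pvBuild dd).size : Int) + 1) := by
  induction t generalizing dd po with
  | nil => simp
  | cons c t ih =>
      simp only [List.foldl_cons, List.map_cons, List.flatten_cons]
      cases h : dd.get? c with
      | some v =>
          have hc : dd.contains c = true := by
            simp [PySem.Dict.contains_eq_isSome_get?, h]
          have hstep : pvBuild dd c = dd := by simp [pvBuild, hc]
          have hget : (t.foldl pvBuild dd).getD c [] = v :=
            PySem.Dict.getD_of_get?_eq_some _ _ (pvPreserve t dd h)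
          rw [hstep]
          have := ih dd (po ++ v ++ ['-'])
          simp only [pvG, h]
          rw [this, hget]
          simp
      | none =>
          have hc : dd.contains c = false := by
            simp [PySem.Dict.contains_eq_isSome_get?, h]
          have hstep : pvBuild dd c
              = dd.insert c (PySem.Int.toChars ((dd.size : Int) + 1)) := by
            simp [pvBuild, hc]
          have hsize : ((dd.insert c (PySem.Int.toChars ((dd.size : Int) + 1))).size : Int)
              = (dd.size : Int) + 1 := by
            rw [PySem.Dict.size_insert, if_neg (by simp [hc])]
            push_cast; ring
          have hget : (t.foldl pvBuild
                (dd.insert c (PySem.Int.toChars ((dd.size : Int) + 1)))).getD c []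
              = PySem.Int.toChars ((dd.size : Int) + 1) :=
            PySem.Dict.getD_of_get?_eq_some _ _
              (pvPreserve t _ (PySem.Dict.get?_insert_self dd c _))
          rw [hstep]
          have := ih (dd.insert c (PySem.Int.toChars ((dd.size : Int) + 1)))
            (po ++ PySem.Int.toChars ((dd.size : Int) + 1) ++ ['-'])
          simp only [pvG, h]
          rw [show (dd.size : Int) + 1 + 1
                = ((dd.insert c (PySem.Int.toChars ((dd.size : Int) + 1))).size : Int) + 1 by
              rw [hsize]]
          rw [this, hget]
          simp

-- "-".join(xs ++ [v]) = each xs element with a trailing dash, then v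
lemma pvJoin (vs : List (List Char)) (v : List Char) :
    PySem.Chars.join ['-'] (vs ++ [v]) = (vs.map (· ++ ['-'])).flatten ++ v := by
  induction vs with
  | nil => simp [PySem.Chars.join_singleton]
  | cons a vs ih =>
      cases vs with
      | nil =>
          simp [PySem.Chars.join_cons_cons, PySem.Chars.join_singleton]
      | cons b vs' =>
          simp only [List.cons_append] at ih ⊢
          rw [PySem.Chars.join_cons_cons, ih]
          simp

-- the built dict's value at c ∈ cs IS B's closed-form token
lemma pvTok (cs : List Char) (c : Char) (hc : c ∈ cs) :
    (cs.foldl pvBuild PySem.Dict.empty).getD c [] = liczbyAltTok cs c := by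
  obtain ⟨k, hk⟩ := Option.isSome_iff_exists.mp
    ((PySem.List.index?_isSome_iff cs c).mpr hc)
  obtain ⟨pre, suf, hdec, hlen, hpre⟩ := (PySem.List.index?_eq_some_iff _ _ _).mp hk
  subst hdec
  -- B's token at c
  have htok : liczbyAltTok (pre ++ c :: suf) c
      = PySem.Int.toChars (((PySem.Set.ofList pre).length : Int) + 1) := by
    unfold liczbyAltTok
    rw [hk]
    subst hlen
    rw [show ((((some pre.length).getD 0 : Nat) : Int)) = ((pre.length : Nat) : Int) by rfl,
        PySem.List.slice_to_natCast, List.take_left]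
  rw [htok]
  -- A's dict value at c
  have hsplit : (pre ++ c :: suf).foldl pvBuild PySem.Dict.empty
      = suf.foldl pvBuild (pvBuild (pre.foldl pvBuild PySem.Dict.empty) c) := by
    rw [List.foldl_append, List.foldl_cons]
  set dp := pre.foldl pvBuild PySem.Dict.empty with hdp
  have hnone : dp.get? c = none :=
    pvAbsent pre _ hpre (PySem.Dict.get?_empty _)
  have hcontains : dp.contains c = false := by
    simp [PySem.Dict.contains_eq_isSome_get?, hnone]
  have hstep : pvBuild dp c = dp.insert c (PySem.Int.toChars ((dp.size : Int) + 1)) := by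
    simp [pvBuild, hcontains]
  have hget : ((pre ++ c :: suf).foldl pvBuild PySem.Dict.empty).get? c
      = some (PySem.Int.toChars ((dp.size : Int) + 1)) := by
    rw [hsplit, hstep]
    exact pvPreserve suf _ (PySem.Dict.get?_insert_self dp c _)
  rw [PySem.Dict.getD_of_get?_eq_some _ _ hget]
  -- dp.size = #distinct characters of pre
  have hkeys : dp.keys = PySem.Set.ofList pre := by
    rw [hdp, pvKeysBuild, PySem.Dict.keys_empty]
    rw [PySem.Set.ofList_eq_foldl]
    rfl
  have hsize : dp.size = (PySem.Set.ofList pre).length := by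
    have : dp.keys.length = dp.size := by
      simp [PySem.Dict.keys, PySem.Dict.size]
    rw [← this, hkeys]
  rw [hsize]

-- the memo dict B builds over set(napis) returns the closed-form token at every c ∈ cs
lemma pvNum (cs : List Char) (c : Char) (hc : c ∈ cs) :
    ((PySem.Set.ofList cs).foldl
        (fun d c => d.insert c (liczbyAltTok cs c)) PySem.Dict.empty).getD c []
      = liczbyAltTok cs c := by
  have hitems : ((PySem.Set.ofList cs).foldl
        (fun d c => d.insert c (liczbyAltTok cs c)) PySem.Dict.empty).items
      = (PySem.Dict.empty : PySem.Dict Char (List Char)).items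
          ++ (PySem.Set.ofList cs).map (fun c => (c, liczbyAltTok cs c)) :=
    PySem.Dict.items_foldl_insert_fresh _ _ _ _
      (fun a _ => PySem.Dict.contains_empty a)
      (by simp only [List.map_id']; exact PySem.Set.nodup_ofList cs)
  have hempty : (PySem.Dict.empty : PySem.Dict Char (List Char)).items = [] := rfl
  rw [hempty, List.nil_append] at hitems
  apply PySem.Dict.getD_of_mem_items
  · rw [hitems]
    exact List.mem_map.mpr ⟨c, (PySem.Set.mem_ofList cs c).mpr hc, rfl⟩
  · have hkeys : ((PySem.Set.ofList cs).foldl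
        (fun d c => d.insert c (liczbyAltTok cs c)) PySem.Dict.empty).keys
        = PySem.Set.ofList cs := by
      rw [PySem.Dict.keys, hitems, List.map_map]
      exact List.map_id' _
    rw [hkeys]
    exact PySem.Set.nodup_ofList cs

-- the two ports produce the same character list
lemma pvKey (cs : List Char) :
    ((PySem.List.pyRange 0 (PySem.List.len cs) 1).foldl
        (liczbyStep cs (PySem.List.len cs)) (PySem.Dict.empty, [], 1)).2.1
      = PySem.Chars.join ['-'] (cs.map (fun c =>
          ((PySem.Set.ofList cs).foldl
            (fun d c => d.insert c (liczbyAltTok cs c)) PySem.Dict.empty).getD c [])) := by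
  have hmapcongr : cs.map (fun c =>
        ((PySem.Set.ofList cs).foldl
          (fun d c => d.insert c (liczbyAltTok cs c)) PySem.Dict.empty).getD c [])
      = cs.map (fun c => (cs.foldl pvBuild PySem.Dict.empty).getD c []) :=
    List.map_congr_left (fun c hc => by rw [pvNum cs c hc, ← pvTok cs c hc])
  rw [hmapcongr]
  rcases List.eq_nil_or_concat cs with rfl | ⟨ys, z, rfl⟩
  · simp [PySem.List.pyRange_one_eq_nil, PySem.Chars.join_nil]
  · rw [List.concat_eq_append]
    have hlen : PySem.List.len (ys ++ [z]) = (ys.length : Int) + 1 := by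
      simp [PySem.List.len_eq]
    rw [hlen]
    have hsplit : PySem.List.pyRange 0 ((ys.length : Int) + 1)
        = PySem.List.pyRange 0 (ys.length : Int) ++ [(ys.length : Int)] :=
      PySem.List.pyRange_one_succ_right (by positivity)
    rw [hsplit, List.foldl_append]
    have hfirst : (PySem.List.pyRange 0 (ys.length : Int)).foldl
          (liczbyStep (ys ++ [z]) ((ys.length : Int) + 1)) (PySem.Dict.empty, [], 1)
        = ys.foldl pvG (PySem.Dict.empty, [], 1) := by
      rw [PySem.List.foldl_congr_mem _ _
            (fun acc j => pvG acc (PySem.List.pyGetD ys j ' ')) _ ?_]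
      · exact PySem.List.foldl_pyRange_zero_pyGetD' ys ' ' pvG _
      · intro acc i hi
        rcases PySem.List.mem_pyRange_one.mp hi with ⟨h0, h1⟩
        have hne : i ≠ (ys.length : Int) + 1 - 1 := by omega
        rw [liczbyStep_eq_pvG _ _ _ hne]
        congr 1
        rw [PySem.List.pyGetD_eq_getElem (ys ++ [z]) ' ' h0 (by simp; omega),
            PySem.List.pyGetD_eq_getElem ys ' ' h0 h1]
        exact List.getElem_append_left (by omega)
    rw [hfirst]
    have hinit : ((PySem.Dict.empty : PySem.Dict Char (List Char)).size : Int) + 1 = 1 := by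
      simp [PySem.Dict.size_empty]
    rw [show ((PySem.Dict.empty : PySem.Dict Char (List Char)), ([] : List Char), (1 : Int))
          = (PySem.Dict.empty, ([] : List Char),
             ((PySem.Dict.empty : PySem.Dict Char (List Char)).size : Int) + 1) by rw [hinit]]
    rw [pvMinv]
    set dY := ys.foldl pvBuild PySem.Dict.empty with hdY
    have hfold : (ys ++ [z]).foldl pvBuild PySem.Dict.empty = pvBuild dY z := by
      rw [List.foldl_append]; rfl
    set dF := pvBuild dY z with hdF
    rw [hfold]
    have hz : PySem.List.pyGetD (ys ++ [z]) (ys.length : Int) ' ' = z := by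
      rw [PySem.List.pyGetD_eq_getElem _ _ (by positivity) (by simp)]
      simp
    have hlast : (liczbyStep (ys ++ [z]) ((ys.length : Int) + 1)
          (dY, [] ++ (ys.map (fun c => dY.getD c [] ++ ['-'])).flatten, (dY.size : Int) + 1)
          (ys.length : Int)).2.1
        = (ys.map (fun c => dY.getD c [] ++ ['-'])).flatten ++ dF.getD z [] := by
      simp only [liczbyStep, hz]
      cases h : dY.get? z with
      | some v =>
          have hc : dY.contains z = true := by
            simp [PySem.Dict.contains_eq_isSome_get?, h]
          have : dF.getD z [] = v := by
            rw [hdF]; simp only [pvBuild, hc, if_pos]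
            exact PySem.Dict.getD_of_get?_eq_some _ _ h
          simp [this]
      | none =>
          have hc : dY.contains z = false := by
            simp [PySem.Dict.contains_eq_isSome_get?, h]
          have : dF.getD z [] = PySem.Int.toChars ((dY.size : Int) + 1) := by
            rw [hdF]; simp only [pvBuild, hc]
            simp only [Bool.false_eq_true, if_false]
            exact PySem.Dict.getD_of_get?_eq_some _ _ (PySem.Dict.get?_insert_self _ _ _)
          simp [this]
    simp only [List.foldl_cons, List.foldl_nil]
    rw [hlast]
    have hagree : ∀ c ∈ ys, dF.getD c [] = dY.getD c [] := by
      intro c hc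
      have hmemk : c ∈ dY.keys := by
        rw [hdY, pvKeysBuild, PySem.Dict.keys_empty]
        simp [PySem.Set.mem_update, hc]
      have hsome : (dY.get? c).isSome = true := by
        rw [← PySem.Dict.contains_eq_isSome_get?]
        exact (PySem.Dict.contains_iff_mem_keys dY c).mpr hmemk
      rcases Option.isSome_iff_exists.mp hsome with ⟨v, hv⟩
      have hvF : dF.get? c = some v := by
        rw [hdF]
        have := pvPreserve [z] dY hv
        simpa using this
      rw [PySem.Dict.getD_of_get?_eq_some _ _ hv, PySem.Dict.getD_of_get?_eq_some _ _ hvF]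
    rw [List.map_append, List.map_singleton, pvJoin]
    rw [List.map_map]
    have : ys.map ((fun c => c ++ ['-']) ∘ fun c => dF.getD c [])
        = ys.map (fun c => dY.getD c [] ++ ['-']) :=
      List.map_congr_left (fun c hc => by simp [Function.comp, hagree c hc])
    rw [this]

-- ===== VERDICT (by name: the statement is the Claim_ definition above) =====
theorem liczby_spec : Claim_equal_liczby := by
  intro napis _
  unfold Spec_liczby
  exact congrArg String.ofList (pvKey napis.toList)
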